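-- pv_equiv track=rewrite | github.com/farhanazam98/biosec-talent-pipeline | src/stage4_dedup.py | merge_source_ids
-- ===== SOURCE A (Python) =====
-- def merge_source_ids(rows, indices):
--     parts = set()
--     for i in indices:
--         raw = rows[i].get("source_doc_id", "")
--         if not raw:
--             continue
--         # Existing source_doc_id may already be pipe-joined from a prior run
--         for piece in str(raw).split("|"):
--             piece = piece.strip()
--             if piece:
--                 parts.add(piece)
--     return "|".join(sorted(parts))
-- ===== SOURCE B (Python) =====
-- def merge_source_ids(rows, indices):
--     pieces = [p.strip()
--               for i in indices
--               for p in str(rows[i].get("source_doc_id", "")).split("|")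
--               if p.strip()]
--     out = []
--     prev = None
--     for _ in range(len(pieces)):
--         cur = None
--         for p in pieces:
--             if (prev is None or p > prev) and (cur is None or p < cur):
--                 cur = p
--         if cur is None:
--             break
--         out.append(cur)
--         prev = cur
--     return "|".join(out)
-- ===== Notes on version B (the rewrite author's own statement) =====
-- stated objective: alternative
-- what changed: Replaces set-then-sort with selection by repeated minimum: collect pieces via one comprehension, then repeatedly scan for the smallest piece strictly greater than the last emitted one (no set, no sort, no dedup pass).
import Mathlib
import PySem

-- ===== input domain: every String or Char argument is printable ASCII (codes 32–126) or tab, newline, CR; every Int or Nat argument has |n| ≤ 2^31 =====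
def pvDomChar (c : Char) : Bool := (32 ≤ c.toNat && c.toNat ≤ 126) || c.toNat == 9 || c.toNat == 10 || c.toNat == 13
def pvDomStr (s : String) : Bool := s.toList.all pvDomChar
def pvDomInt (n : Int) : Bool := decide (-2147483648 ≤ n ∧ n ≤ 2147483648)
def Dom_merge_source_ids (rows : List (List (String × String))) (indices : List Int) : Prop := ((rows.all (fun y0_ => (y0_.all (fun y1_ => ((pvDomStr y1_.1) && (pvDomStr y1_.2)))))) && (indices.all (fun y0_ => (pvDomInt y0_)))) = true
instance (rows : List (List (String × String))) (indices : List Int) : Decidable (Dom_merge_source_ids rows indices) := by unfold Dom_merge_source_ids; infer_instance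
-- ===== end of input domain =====

-- B replaces A's set-then-sort with selection by repeated minimum: collect the stripped pieces by one
-- comprehension, then repeatedly scan for the smallest piece strictly greater than the last one emitted
-- (no set, no sort, no dedup pass). Alternative decomposition; not claimed faster.
-- Pieces are handled as List Char (exact for the ASCII domain); pyGetD is used under Pre_ (every index in range).

-- ===== PORT A =====
def merge_source_ids (rows : List (List (String × String))) (indices : List Int) : String :=
  let parts : PySem.Set (List Char) := indices.foldl (fun parts i =>
    let raw := PySem.Dict.getD ⟨PySem.List.pyGetD rows i []⟩ "source_doc_id" ""
    if raw = "" then parts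
    else (PySem.Chars.splitOn raw.toList ['|']).foldl (fun parts piece =>
      let piece := PySem.Chars.strip piece
      if piece = [] then parts else PySem.Set.add parts piece) parts) PySem.Set.empty
  String.ofList (PySem.Chars.join ['|'] (PySem.List.sorted parts (fun x => x) false))

-- ===== PORT B =====
-- inner 'for p in pieces' scan: cur := the minimum piece strictly above prev (None = no such piece)
def pvMinAbove (pieces : List (List Char)) (prev : Option (List Char)) : Option (List Char) :=
  pieces.foldl (fun cur p =>
    if (prev.all (fun q => decide (q < p))) && (cur.all (fun c => decide (p < c)))
    then some p else cur) none

-- outer 'for _ in range(len(pieces))' loop with its break, fuel = the range length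
def pvSelLoop : Nat → List (List Char) → Option (List Char) → List (List Char) → List (List Char)
  | 0, _, _, out => out
  | n+1, pieces, prev, out =>
    match pvMinAbove pieces prev with
    | none => out
    | some cur => pvSelLoop n pieces (some cur) (out ++ [cur])

def merge_source_ids_alt (rows : List (List (String × String))) (indices : List Int) : String :=
  let pieces : List (List Char) := indices.flatMap (fun i =>
    ((PySem.Chars.splitOn (PySem.Dict.getD ⟨PySem.List.pyGetD rows i []⟩ "source_doc_id" "").toList ['|']).map
      PySem.Chars.strip).filter (fun p => p ≠ []))
  String.ofList (PySem.Chars.join ['|'] (pvSelLoop pieces.length pieces none []))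

-- ===== PRECONDITION & SPEC =====
-- Pre_ excludes exactly the inputs where Python's rows[i] raises IndexError (index out of range).
def Pre_merge_source_ids (rows : List (List (String × String))) (indices : List Int) : Prop :=
  ∀ i ∈ indices, PySem.Raise.InRange rows.length i
instance (rows : List (List (String × String))) (indices : List Int) : Decidable (Pre_merge_source_ids rows indices) := by unfold Pre_merge_source_ids; infer_instance
def pvWitness_merge_source_ids : (List (List (String × String))) × List Int :=
  ([[("source_doc_id", " b |a|b ")], [("x", "y")]], [0, 1, 0, -2])
def Spec_merge_source_ids (rows : List (List (String × String))) (indices : List Int) (out : String) : Prop := out = merge_source_ids_alt rows indices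
instance (rows : List (List (String × String))) (indices : List Int) (out : String) : Decidable (Spec_merge_source_ids rows indices out) := by unfold Spec_merge_source_ids; infer_instance

-- ===== CLAIM (what is proved, stated in full; the proofs are below) =====
def Claim_equal_merge_source_ids : Prop := ∀ (rows : List (List (String × String))) (indices : List Int), Dom_merge_source_ids rows indices → Pre_merge_source_ids rows indices → Spec_merge_source_ids rows indices (merge_source_ids rows indices)

-- ===== LEMMAS AND PROOFS =====

/-- The stripped non-empty pieces contributed by one row (B's comprehension body). -/
def rowPieces (row : List (String × String)) : List (List Char) :=
  ((PySem.Chars.splitOn (PySem.Dict.getD ⟨row⟩ "source_doc_id" "").toList ['|']).map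
    PySem.Chars.strip).filter (fun p => p ≠ [])

/-- All pieces, in encounter order. -/
def allPieces (rows : List (List (String × String))) (indices : List Int) : List (List Char) :=
  indices.flatMap (fun i => rowPieces (PySem.List.pyGetD rows i []))

theorem innerA (ps : List (List Char)) (s : PySem.Set (List Char)) :
    ps.foldl (fun parts piece =>
      let piece := PySem.Chars.strip piece
      if piece = [] then parts else PySem.Set.add parts piece) s
    = ((ps.map PySem.Chars.strip).filter (fun p => p ≠ [])).foldl PySem.Set.add s := by
  induction ps generalizing s with
  | nil => rfl
  | cons p t ih =>
    simp only [List.foldl_cons, List.map_cons, List.filter_cons]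
    by_cases h : PySem.Chars.strip p = [] <;> simp [h, ih]

theorem outerA (rows : List (List (String × String))) (idxs : List Int) (s : PySem.Set (List Char)) :
    idxs.foldl (fun parts i =>
      let raw := PySem.Dict.getD ⟨PySem.List.pyGetD rows i []⟩ "source_doc_id" ""
      if raw = "" then parts
      else (PySem.Chars.splitOn raw.toList ['|']).foldl (fun parts piece =>
        let piece := PySem.Chars.strip piece
        if piece = [] then parts else PySem.Set.add parts piece) parts) s
    = (allPieces rows idxs).foldl PySem.Set.add s := by
  induction idxs generalizing s with
  | nil => rfl
  | cons i t ih =>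
    simp only [List.foldl_cons, allPieces, List.flatMap_cons, List.foldl_append]
    rw [ih]
    congr 1
    by_cases h : PySem.Dict.getD ⟨PySem.List.pyGetD rows i []⟩ "source_doc_id" "" = ""
    · rw [if_pos h]
      simp only [rowPieces, h]
      rfl
    · rw [if_neg h, innerA]
      simp only [rowPieces]

/-- 'p is strictly above prev' (prev = None accepts everything). -/
def pvCond (prev : Option (List Char)) (p : List Char) : Bool :=
  prev.all (fun q => decide (q < p))

theorem minAbove_fold_spec (L : List (List Char)) (prev : Option (List Char)) :
    ∀ cur : Option (List Char), (∀ c, cur = some c → pvCond prev c = true) →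
    (((L.foldl (fun cur p =>
        if (prev.all (fun q => decide (q < p))) && (cur.all (fun c => decide (p < c)))
        then some p else cur) cur) = none ↔ cur = none ∧ ∀ p ∈ L, pvCond prev p = false) ∧
     (∀ m, (L.foldl (fun cur p =>
        if (prev.all (fun q => decide (q < p))) && (cur.all (fun c => decide (p < c)))
        then some p else cur) cur) = some m →
        pvCond prev m = true ∧ (cur = some m ∨ m ∈ L) ∧
        (∀ p ∈ L, pvCond prev p = true → m ≤ p) ∧ (∀ c, cur = some c → m ≤ c))) := by
  induction L with
  | nil =>
    intro cur hc
    refine ⟨by simp, ?_⟩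
    intro m hm
    simp only [List.foldl_nil] at hm
    subst hm
    exact ⟨hc m rfl, Or.inl rfl, by simp, fun c hcc => le_of_eq (Option.some.inj hcc)⟩
  | cons p t ih =>
    intro cur hc
    simp only [List.foldl_cons]
    by_cases hcond : ((prev.all (fun q => decide (q < p))) && (cur.all (fun c => decide (p < c)))) = true
    · -- p becomes the new cur
      rw [if_pos hcond]
      have h12 := hcond
      rw [Bool.and_eq_true] at h12
      have hpc : pvCond prev p = true := h12.1
      have hcur : ∀ c, cur = some c → p < c := by
        intro c hcc
        have h2' := h12.2
        rw [hcc] at h2'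
        simpa using h2'
      obtain ⟨h1, h2⟩ := ih (some p) (by rintro c ⟨rfl⟩; exact hpc)
      refine ⟨?_, ?_⟩
      · rw [h1]
        simp only [reduceCtorEq, false_and, false_iff, not_and, not_forall]
        intro hn
        by_contra hall
        push Not at hall
        exact absurd hpc (by simp [hall p List.mem_cons_self])
      · intro m hm
        obtain ⟨hm1, hm2, hm3, hm4⟩ := h2 m hm
        refine ⟨hm1, ?_, ?_, ?_⟩
        · rcases hm2 with h | h
          · exact Or.inr (by simp at h; simp [h])
          · exact Or.inr (List.mem_cons_of_mem _ h)
        · intro q hq hqc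
          rcases List.mem_cons.mp hq with rfl | hq'
          · exact hm4 q rfl
          · exact hm3 q hq' hqc
        · intro c hcc
          exact le_trans (hm4 p rfl) (le_of_lt (hcur c hcc))
    · -- cur is kept
      rw [if_neg hcond]
      obtain ⟨h1, h2⟩ := ih cur hc
      have hskip : cur = none → pvCond prev p = false := by
        intro hn
        subst hn
        simpa using hcond
      refine ⟨?_, ?_⟩
      · rw [h1]
        constructor
        · rintro ⟨hn, hall⟩
          exact ⟨hn, by intro q hq; rcases List.mem_cons.mp hq with rfl | hq'
                        exacts [hskip hn, hall q hq']⟩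
        · rintro ⟨hn, hall⟩
          exact ⟨hn, fun q hq => hall q (List.mem_cons_of_mem _ hq)⟩
      · intro m hm
        obtain ⟨hm1, hm2, hm3, hm4⟩ := h2 m hm
        refine ⟨hm1, ?_, ?_, hm4⟩
        · rcases hm2 with h | h
          exacts [Or.inl h, Or.inr (List.mem_cons_of_mem _ h)]
        · intro q hq hqc
          rcases List.mem_cons.mp hq with h | hq'
          · -- q = p: p admissible but not taken, so cur = some c with ¬ p < c, and m ≤ c
            rw [h] at hqc ⊢
            rcases hcc : cur with _ | c
            · exact absurd hqc (by rw [hskip hcc]; simp)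
            · have hA : prev.all (fun q => decide (q < p)) = true := hqc
              have hnc := hcond
              rw [hcc] at hnc
              simp only [hA, Bool.true_and] at hnc
              have hnp : ¬ p < c := by simpa using hnc
              exact le_trans (hm4 c hcc) (le_of_not_gt (by simpa using hnp))
          · exact hm3 q hq' hqc

/-- pvMinAbove is the head of the admissible part of any strictly sorted enumeration S of L's values. -/
theorem minAbove_eq_head (L S : List (List Char)) (hmem : ∀ x, x ∈ S ↔ x ∈ L)
    (hS : S.Pairwise (· < ·)) (prev : Option (List Char)) :
    pvMinAbove L prev = (S.filter (fun p => pvCond prev p)).head? := by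
  obtain ⟨h1, h2⟩ := minAbove_fold_spec L prev none (by simp)
  rcases hf : S.filter (fun p => pvCond prev p) with _ | ⟨m, rest⟩
  · -- no admissible element
    rw [pvMinAbove, h1.mpr ⟨rfl, ?_⟩]
    · rfl
    · intro p hp
      by_contra hb
      have hpS : p ∈ S := (hmem p).mpr hp
      have : p ∈ S.filter (fun p => pvCond prev p) :=
        List.mem_filter.mpr ⟨hpS, by simpa using hb⟩
      simp [hf] at this
  · -- admissible; the fold returns the minimum, which is m
    have hmS : m ∈ S.filter (fun p => pvCond prev p) := by rw [hf]; exact List.mem_cons_self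
    have hmL : m ∈ L := (hmem m).mp (List.mem_filter.mp hmS).1
    have hmc : pvCond prev m = true := by simpa using (List.mem_filter.mp hmS).2
    rcases hr : pvMinAbove L prev with _ | m'
    · exact absurd hmc (by rw [(h1.mp hr).2 m hmL]; simp)
    · obtain ⟨hc1, hc2, hc3, _⟩ := h2 m' hr
      have hm'L : m' ∈ L := by
        rcases hc2 with h | h
        · exact absurd h (by simp)
        · exact h
      have hm'f : m' ∈ S.filter (fun p => pvCond prev p) :=
        List.mem_filter.mpr ⟨(hmem m').mpr hm'L, hc1⟩
      have hle1 : m' ≤ m := hc3 m hmL hmc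
      have hle2 : m ≤ m' := by
        rw [hf] at hm'f
        rcases List.mem_cons.mp hm'f with h | h
        · exact le_of_eq h.symm
        · have hpw : (m :: rest).Pairwise (· < ·) := hf ▸ hS.filter _
          exact le_of_lt ((List.rel_of_pairwise_cons hpw) h)
      rw [List.head?_cons, le_antisymm hle1 hle2]

/-- Emitting the minimum m shrinks the admissible part of S to its tail. -/
theorem filter_cond_tail (S : List (List Char)) (hS : S.Pairwise (· < ·))
    (prev : Option (List Char)) (m : List Char) (rest : List (List Char))
    (hf : S.filter (fun p => pvCond prev p) = m :: rest) :
    S.filter (fun p => pvCond (some m) p) = rest := by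
  have hmS : m ∈ S.filter (fun p => pvCond prev p) := by rw [hf]; exact List.mem_cons_self
  have hmc : pvCond prev m = true := by simpa using (List.mem_filter.mp hmS).2
  have hpw : (m :: rest).Pairwise (· < ·) := hf ▸ hS.filter _
  have step1 : S.filter (fun p => pvCond (some m) p)
      = (S.filter (fun p => pvCond prev p)).filter (fun p => pvCond (some m) p) := by
    rw [List.filter_filter]
    refine List.filter_congr ?_
    intro x hx
    rcases hcase : pvCond (some m) x with _ | _
    · simp
    · have hmx : m < x := by simpa [pvCond] using hcase
      have hcx : pvCond prev x = true := by
        rcases prev with _ | q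
        · rfl
        · have hqm : q < m := by simpa [pvCond] using hmc
          simpa [pvCond] using lt_trans hqm hmx
      simp [hcx]
  rw [step1, hf, List.filter_cons]
  have hmm : pvCond (some m) m = false := by simp [pvCond]
  rw [hmm]
  simp only [Bool.false_eq_true, if_false]
  exact List.filter_eq_self.mpr (by
    intro x hx
    simpa [pvCond] using (List.rel_of_pairwise_cons hpw) hx)

/-- The selection loop writes out exactly the admissible part of S, given enough fuel. -/
theorem selLoop_eq (L S : List (List Char)) (hmem : ∀ x, x ∈ S ↔ x ∈ L)
    (hS : S.Pairwise (· < ·)) :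
    ∀ (fuel : Nat) (prev : Option (List Char)) (out : List (List Char)),
    (S.filter (fun p => pvCond prev p)).length ≤ fuel →
    pvSelLoop fuel L prev out = out ++ S.filter (fun p => pvCond prev p) := by
  intro fuel
  induction fuel with
  | zero =>
    intro prev out hlen
    rw [List.length_eq_zero_iff.mp (Nat.le_zero.mp hlen)]
    simp [pvSelLoop]
  | succ n ih =>
    intro prev out hlen
    rw [pvSelLoop, minAbove_eq_head L S hmem hS prev]
    rcases hf : S.filter (fun p => pvCond prev p) with _ | ⟨m, rest⟩
    · simp
    · simp only [List.head?_cons]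
      rw [ih (some m) (out ++ [m]) ?_, filter_cond_tail S hS prev m rest hf]
      · simp
      · rw [filter_cond_tail S hS prev m rest hf]
        have := hf ▸ hlen
        simpa using this

/-- B's collected pieces are exactly allPieces (the empty raw contributes only an empty piece, filtered out). -/
theorem pieces_eq (rows : List (List (String × String))) (indices : List Int) :
    indices.flatMap (fun i =>
      ((PySem.Chars.splitOn (PySem.Dict.getD ⟨PySem.List.pyGetD rows i []⟩ "source_doc_id" "").toList ['|']).map
        PySem.Chars.strip).filter (fun p => p ≠ []))
    = allPieces rows indices := by
  unfold allPieces rowPieces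
  rfl

-- ===== VERDICT (by name: the statement is the Claim_ definition above) =====
theorem merge_source_ids_spec : Claim_equal_merge_source_ids := by
  intro rows indices _ _
  unfold Spec_merge_source_ids merge_source_ids merge_source_ids_alt
  rw [outerA, pieces_eq]
  rw [show (PySem.Set.empty : PySem.Set (List Char)) = [] from rfl, ← PySem.Set.ofList_eq_foldl]
  set L := allPieces rows indices with hL
  set S := PySem.List.sorted (PySem.Set.ofList L) (fun x => x) false with hSdef
  have hmem : ∀ x, x ∈ S ↔ x ∈ L := by
    intro x
    rw [hSdef, PySem.List.mem_sorted, PySem.Set.mem_ofList]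
  have hS : S.Pairwise (· < ·) := by
    have h := PySem.List.sorted_ofList_pairwise_lt (xs := L)
    rw [hSdef]
    convert h using 2
  have hfuel : (S.filter (fun p => pvCond none p)).length ≤ L.length := by
    have h1 : S.filter (fun p => pvCond none p) = S := List.filter_eq_self.mpr (by intro x _; rfl)
    rw [h1, hSdef, PySem.List.length_sorted]
    exact PySem.Set.length_ofList_le L
  have hsel := selLoop_eq L S hmem hS L.length none [] hfuel
  rw [show (fun p => pvCond none p) = (fun _ : List Char => true) from rfl] at hsel
  simp only [List.filter_true, List.nil_append] at hsel
  simp only [hsel, hSdef]
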